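-- pv_equiv track=rewrite | github.com/Matan-Gold/github-repo-analyzer-api | evaluation.py | _looks_like_file_token
-- ===== SOURCE A (Python) =====
-- COMMON_FILE_EXTENSIONS = {
--     "py",
--     "md",
--     "rst",
--     "txt",
--     "toml",
--     "json",
--     "yml",
--     "yaml",
--     "ini",
--     "cfg",
--     "xml",
--     "go",
--     "rs",
--     "js",
--     "ts",
--     "tsx",
--     "jsx",
--     "java",
--     "sh",
-- }
--
-- def _looks_like_file_token(token: str, repo_paths: list[str]) -> bool:
--     cleaned = token.strip(".,:;()[]{}")
--     if not cleaned:
--         return False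
--     if "/" in cleaned:
--         return True
--     if "." not in cleaned:
--         return False
--
--     known_exts = {path.rsplit(".", 1)[1].lower() for path in repo_paths if "." in path}
--     known_exts |= COMMON_FILE_EXTENSIONS
--     stem, ext = cleaned.rsplit(".", 1)
--     return len(stem) > 1 and ext.lower() in known_exts
-- ===== SOURCE B (Python) =====
-- COMMON_FILE_EXTENSIONS = {
--     "py", "md", "rst", "txt", "toml", "json", "yml", "yaml", "ini", "cfg",
--     "xml", "go", "rs", "js", "ts", "tsx", "jsx", "java", "sh",
-- }
--
-- def _looks_like_file_token(token: str, repo_paths: list[str]) -> bool: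
--     # One fused pass over the cleaned token gathers slash flag, stem length and
--     # the extension; paths are matched by lowercase suffix instead of rsplit.
--     cleaned = token.strip(".,:;()[]{}")
--     has_slash = False
--     seen_dot = False
--     stem_len = 0
--     ext_chars = []
--     pos = 0
--     for ch in cleaned:
--         if ch == '/':
--             has_slash = True
--         if ch == '.':
--             seen_dot = True
--             stem_len = pos
--             ext_chars = []
--         elif seen_dot:
--             ext_chars.append(ch)
--         pos += 1
--     if has_slash:
--         return True
--     if not seen_dot or stem_len <= 1:
--         return False
--     ext = ''.join(ext_chars).lower()
--     if ext in COMMON_FILE_EXTENSIONS: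
--         return True
--     suffix = '.' + ext
--     return any(p.lower().endswith(suffix) for p in repo_paths)
-- ===== Notes on version B (the rewrite author's own statement) =====
-- stated objective: alternative
-- what changed: A makes staged passes (substring tests for '/' and '.', rsplit of the token, a set of every path's rsplit extension, then a lookup); B makes one fused left-to-right pass over the cleaned token with accumulators (slash flag, stem length, extension buffer reset at each dot) and matches paths by a lowercase '.ext' suffix test instead of splitting them.
import Mathlib
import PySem

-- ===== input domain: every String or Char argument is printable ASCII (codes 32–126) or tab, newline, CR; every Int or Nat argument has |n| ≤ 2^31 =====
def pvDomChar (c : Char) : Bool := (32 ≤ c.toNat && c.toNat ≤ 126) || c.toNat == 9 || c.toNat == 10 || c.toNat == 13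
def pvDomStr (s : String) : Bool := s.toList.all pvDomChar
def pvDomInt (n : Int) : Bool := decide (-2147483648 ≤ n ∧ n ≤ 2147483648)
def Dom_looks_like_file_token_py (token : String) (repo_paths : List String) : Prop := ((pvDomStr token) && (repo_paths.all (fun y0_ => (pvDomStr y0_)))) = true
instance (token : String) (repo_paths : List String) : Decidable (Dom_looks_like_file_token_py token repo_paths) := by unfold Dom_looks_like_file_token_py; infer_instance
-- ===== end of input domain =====

-- B replaces A's staged passes (substring tests, rsplit, build-an-extension-set, lookup) by one
-- fused accumulator pass over the cleaned token plus a lowercase '.ext' suffix test on the paths.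

-- s.rsplit(".", 1) ported by hand for PORT A: (stem, ext) split at the LAST '.'; exact when '.' ∈ s
-- (A only uses the result under a "'.' in s" guard; for '.'-free input we return (s, [])).
def pvRsplitDot : List Char → List Char × List Char
  | [] => ([], [])
  | c :: rest =>
    if '.' ∈ rest then
      let p := pvRsplitDot rest
      (c :: p.1, p.2)
    else if c = '.' then ([], rest)
    else (c :: rest, [])

-- module constant COMMON_FILE_EXTENSIONS (a Python set literal), shared by both sources
def pvCommonExts : PySem.Set (List Char) :=
  PySem.Set.ofList ["py".toList, "md".toList, "rst".toList, "txt".toList, "toml".toList,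
    "json".toList, "yml".toList, "yaml".toList, "ini".toList, "cfg".toList, "xml".toList,
    "go".toList, "rs".toList, "js".toList, "ts".toList, "tsx".toList, "jsx".toList,
    "java".toList, "sh".toList]

-- ===== PORT A =====
def looks_like_file_token_py (token : String) (repo_paths : List String) : Bool :=
  let cleaned := PySem.Chars.stripChars token.toList ".,:;()[]{}".toList
  if cleaned.isEmpty then false
  else if PySem.Chars.isIn ['/'] cleaned then true
  else if !(PySem.Chars.isIn ['.'] cleaned) then false
  else
    -- known_exts = {path.rsplit(".",1)[1].lower() for path in repo_paths if "." in path}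
    let known_exts : PySem.Set (List Char) :=
      PySem.Set.ofList ((repo_paths.filter (fun p => PySem.Chars.isIn ['.'] p.toList)).map
        (fun p => PySem.Chars.lower (pvRsplitDot p.toList).2))
    -- known_exts |= COMMON_FILE_EXTENSIONS
    let known_exts' := PySem.Set.union known_exts pvCommonExts
    let se := pvRsplitDot cleaned
    decide (se.1.length > 1) && PySem.Set.contains known_exts' (PySem.Chars.lower se.2)

-- ===== PORT B =====
-- B's single for-loop over `cleaned` (for ch in cleaned, with a running position counter):
-- state = (has_slash, seen_dot, stem_len, ext_chars), transcribed as structural recursion.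
def pvScanB : List Char → Int → Bool × Bool × Int × List Char → Bool × Bool × Int × List Char
  | [], _, st => st
  | ch :: rest, pos, (hs, sd, sl, ec) =>
    let hs' := if ch = '/' then true else hs
    pvScanB rest (pos + 1)
      (if ch = '.' then (hs', true, pos, ([] : List Char))
       else if sd then (hs', sd, sl, ec ++ [ch])
       else (hs', sd, sl, ec))

def looks_like_file_token_py_alt (token : String) (repo_paths : List String) : Bool :=
  let cleaned := PySem.Chars.stripChars token.toList ".,:;()[]{}".toList
  let st := pvScanB cleaned 0 (false, false, 0, [])
  if st.1 then true
  else if !st.2.1 || decide (st.2.2.1 ≤ 1) then false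
  else
    let e := PySem.Chars.lower st.2.2.2
    if PySem.Set.contains pvCommonExts e then true
    else
      repo_paths.any (fun p => PySem.Chars.endswith (PySem.Chars.lower p.toList) ('.' :: e))

-- ===== PRECONDITION & SPEC =====
def Spec_looks_like_file_token_py (token : String) (repo_paths : List String) (out : Bool) : Prop := out = looks_like_file_token_py_alt token repo_paths
instance (token : String) (repo_paths : List String) (out : Bool) : Decidable (Spec_looks_like_file_token_py token repo_paths out) := by unfold Spec_looks_like_file_token_py; infer_instance

-- ===== CLAIM =====
def Claim_equal_looks_like_file_token_py : Prop := ∀ (token : String) (repo_paths : List String), Dom_looks_like_file_token_py token repo_paths → Spec_looks_like_file_token_py token repo_paths (looks_like_file_token_py token repo_paths)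

-- ===== LEMMAS AND PROOFS =====

lemma pv_lowerChar_dot (c : Char) : PySem.Chars.lowerChar c = '.' ↔ c = '.' := by
  unfold PySem.Chars.lowerChar PySem.Chars.isupper
  constructor
  · intro h
    split_ifs at h with hu
    · exfalso
      simp only [Bool.and_eq_true, decide_eq_true_eq, Char.le_def] at hu
      have h1' : 65 ≤ c.val.toNat := by exact_mod_cast hu.1
      have h2' : c.val.toNat ≤ 90 := by exact_mod_cast hu.2
      have hv : Nat.isValidChar (c.toNat + 32) := by left; unfold Char.toNat; omega
      have h46 : (Char.ofNat (c.toNat + 32)).toNat = ('.' : Char).toNat := by rw [h]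
      rw [Char.toNat_ofNat, if_pos hv] at h46
      unfold Char.toNat at h46
      have : ('.' : Char).val.toNat = 46 := by decide
      omega
    · exact h
  · intro h; subst h; decide

lemma pv_mem_dot_lower (p : List Char) : '.' ∈ PySem.Chars.lower p ↔ '.' ∈ p := by
  unfold PySem.Chars.lower
  simp only [List.mem_map]
  constructor
  · rintro ⟨a, ha, h⟩; rwa [(pv_lowerChar_dot a).mp h] at ha
  · intro h; exact ⟨'.', h, (pv_lowerChar_dot '.').mpr rfl⟩

lemma pv_rsplit_recompose (cs : List Char) (h : '.' ∈ cs) :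
    cs = (pvRsplitDot cs).1 ++ '.' :: (pvRsplitDot cs).2 := by
  induction cs with
  | nil => simp at h
  | cons c rest ih =>
    unfold pvRsplitDot
    by_cases hr : '.' ∈ rest
    · simp only [if_pos hr]
      exact congrArg (c :: ·) (ih hr)
    · have hc : c = '.' := by
        rcases List.mem_cons.mp h with h1 | h2
        · exact h1.symm
        · exact absurd h2 hr
      simp [if_neg hr, hc]

lemma pv_rsplit_no_dot (cs : List Char) (h : '.' ∈ cs) : '.' ∉ (pvRsplitDot cs).2 := by
  induction cs with
  | nil => simp at h
  | cons c rest ih =>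
    unfold pvRsplitDot
    by_cases hr : '.' ∈ rest
    · simp only [if_pos hr]; exact ih hr
    · have hc : c = '.' := by
        rcases List.mem_cons.mp h with h1 | h2
        · exact h1.symm
        · exact absurd h2 hr
      simp [hc, hr]

lemma pv_rsplit_append (zs e : List Char) (he : '.' ∉ e) :
    pvRsplitDot (zs ++ '.' :: e) = (zs, e) := by
  induction zs with
  | nil => simp [pvRsplitDot, he]
  | cons z zs ih =>
    have hmem : '.' ∈ zs ++ '.' :: e := by simp
    simp only [List.cons_append, pvRsplitDot, if_pos hmem, ih]

lemma pv_endswith_iff (ys e : List Char) (he : '.' ∉ e) :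
    PySem.Chars.endswith ys ('.' :: e) = true ↔ ('.' ∈ ys ∧ (pvRsplitDot ys).2 = e) := by
  rw [PySem.Chars.endswith_iff]
  constructor
  · rintro ⟨zs, rfl⟩
    refine ⟨by simp, ?_⟩
    rw [pv_rsplit_append zs e he]
  · rintro ⟨hy, h2⟩
    exact ⟨(pvRsplitDot ys).1, by rw [← h2]; exact (pv_rsplit_recompose ys hy).symm⟩

lemma pv_rsplit_lower (p : List Char) (h : '.' ∈ p) :
    pvRsplitDot (PySem.Chars.lower p) =
      (PySem.Chars.lower (pvRsplitDot p).1, PySem.Chars.lower (pvRsplitDot p).2) := by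
  induction p with
  | nil => simp at h
  | cons c rest ih =>
    show pvRsplitDot (PySem.Chars.lowerChar c :: PySem.Chars.lower rest) = _
    by_cases hr : '.' ∈ rest
    · have hr' : '.' ∈ PySem.Chars.lower rest := (pv_mem_dot_lower rest).mpr hr
      unfold pvRsplitDot
      simp only [if_pos hr, if_pos hr', ih hr]
      rfl
    · have hc : c = '.' := by
        rcases List.mem_cons.mp h with h1 | h2
        · exact h1.symm
        · exact absurd h2 hr
      have hr' : '.' ∉ PySem.Chars.lower rest := fun hx => hr ((pv_mem_dot_lower rest).mp hx)
      have hlc : PySem.Chars.lowerChar c = '.' := (pv_lowerChar_dot c).mpr hc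
      unfold pvRsplitDot
      simp [if_neg hr, if_neg hr', hc]
      rfl

lemma pv_isIn_singleton (c : Char) (s : List Char) :
    PySem.Chars.isIn [c] s = decide (c ∈ s) := by
  rw [Bool.eq_iff_iff, PySem.Chars.isIn_iff_infix, decide_eq_true_eq]
  constructor
  · intro h; exact h.subset (by simp)
  · intro h
    obtain ⟨l1, l2, rfl⟩ := List.append_of_mem h
    exact ⟨l1, l2, by simp⟩

-- B's per-path suffix test = "'.' in p" + extension comparison (A's set-comprehension filter/map)
lemma pv_endswith_lower (p : String) (e : List Char) (he : '.' ∉ e) :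
    PySem.Chars.endswith (PySem.Chars.lower p.toList) ('.' :: e) = true ↔
      ('.' ∈ p.toList ∧ PySem.Chars.lower (pvRsplitDot p.toList).2 = e) := by
  rw [pv_endswith_iff _ _ he, pv_mem_dot_lower]
  constructor
  · rintro ⟨h1, h2⟩
    refine ⟨h1, ?_⟩
    rw [pv_rsplit_lower p.toList h1] at h2
    exact h2
  · rintro ⟨h1, h2⟩
    exact ⟨h1, by rw [pv_rsplit_lower p.toList h1]; exact h2⟩

-- membership in A's built index = B's lazy suffix scan over repo_paths
lemma pv_index_eq_scan (repo_paths : List String) (e : List Char) (he : '.' ∉ e) :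
    PySem.Set.contains
      (PySem.Set.union
        (PySem.Set.ofList ((repo_paths.filter (fun p => decide ('.' ∈ p.toList))).map
          (fun p => PySem.Chars.lower (pvRsplitDot p.toList).2)))
        pvCommonExts) e
    = (if PySem.Set.contains pvCommonExts e then true
       else repo_paths.any (fun p => PySem.Chars.endswith (PySem.Chars.lower p.toList) ('.' :: e))) := by
  rw [Bool.eq_iff_iff]
  simp only [PySem.Set.contains_iff, PySem.Set.mem_union, PySem.Set.mem_ofList,
    List.mem_map, List.mem_filter, decide_eq_true_eq, Bool.if_true_left, Bool.or_eq_true,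
    List.any_eq_true, PySem.Set.contains_iff]
  constructor
  · rintro (⟨p, ⟨hp, hdot⟩, rfl⟩ | hc)
    · exact Or.inr ⟨p, hp, (pv_endswith_lower p _ he).mpr ⟨hdot, rfl⟩⟩
    · exact Or.inl hc
  · rintro (hc | ⟨p, hp, hend⟩)
    · exact Or.inr hc
    · obtain ⟨h1, h2⟩ := (pv_endswith_lower p e he).mp hend
      exact Or.inl ⟨p, ⟨hp, h1⟩, h2⟩

-- rsplit unfolding helpers
lemma pv_rsplit_cons_mem (c : Char) (rest : List Char) (hr : '.' ∈ rest) :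
    pvRsplitDot (c :: rest) = (c :: (pvRsplitDot rest).1, (pvRsplitDot rest).2) := by
  conv_lhs => rw [pvRsplitDot]
  rw [if_pos hr]

lemma pv_rsplit_cons_dot (rest : List Char) (hr : '.' ∉ rest) :
    pvRsplitDot ('.' :: rest) = ([], rest) := by
  conv_lhs => rw [pvRsplitDot]
  rw [if_neg hr, if_pos rfl]

lemma pv_scan_eq (cs : List Char) : ∀ (pos : Int) (hs sd : Bool) (sl : Int) (ec : List Char),
    pvScanB cs pos (hs, sd, sl, ec) =
      (hs || decide ('/' ∈ cs),
       if '.' ∈ cs then (true, pos + ((pvRsplitDot cs).1.length : Int), (pvRsplitDot cs).2)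
       else (sd, sl, if sd then ec ++ cs else ec)) := by
  induction cs with
  | nil => intro pos hs sd sl ec; simp [pvScanB]
  | cons c rest ih =>
    intro pos hs sd sl ec
    simp only [pvScanB]
    by_cases hc : c = '.'
    · subst hc
      rw [if_neg (by decide : ¬('.' : Char) = '/'), if_pos rfl, ih]
      have hm : '.' ∈ '.' :: rest := List.mem_cons_self ..
      have hf : decide ('/' ∈ '.' :: rest) = decide ('/' ∈ rest) := by
        simp [List.mem_cons]
      rw [if_pos hm, hf]
      by_cases hr : '.' ∈ rest
      · rw [if_pos hr, pv_rsplit_cons_mem '.' rest hr]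
        simp only [Prod.mk.injEq, List.length_cons, true_and, and_true]
        push_cast; ring
      · rw [if_neg hr, pv_rsplit_cons_dot rest hr]
        simp
    · rw [if_neg hc]
      have hfsteq : (hs || decide ('/' ∈ c :: rest)) = ((if c = '/' then true else hs) || decide ('/' ∈ rest)) := by
        by_cases hcs : c = '/'
        · simp [hcs, List.mem_cons]
        · have h2 : ¬('/' : Char) = c := fun h => hcs h.symm
          simp [hcs, List.mem_cons, h2]
      by_cases hm : '.' ∈ c :: rest
      · have hr : '.' ∈ rest := by
          rcases List.mem_cons.mp hm with h1 | h2
          · exact absurd h1.symm hc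
          · exact h2
        rw [if_pos hm, pv_rsplit_cons_mem c rest hr, hfsteq]
        have hlen : pos + (((c :: (pvRsplitDot rest).1).length : Nat) : Int)
            = (pos + 1) + (((pvRsplitDot rest).1.length : Nat) : Int) := by
          simp only [List.length_cons]; push_cast; ring
        rw [hlen]
        by_cases hsd : sd <;> simp [hsd, ih, if_pos hr]
      · have hr : '.' ∉ rest := fun hx => hm (List.mem_cons_of_mem _ hx)
        rw [if_neg hm, hfsteq]
        by_cases hsd : sd <;> simp [hsd, ih, if_neg hr]

-- ===== VERDICT =====
theorem looks_like_file_token_py_spec : Claim_equal_looks_like_file_token_py := by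
  intro token repo_paths _
  unfold Spec_looks_like_file_token_py looks_like_file_token_py looks_like_file_token_py_alt
  simp only []
  set cleaned := PySem.Chars.stripChars token.toList ".,:;()[]{}".toList with hcl
  rw [pv_scan_eq]
  by_cases hsl : '/' ∈ cleaned
  · have hne : cleaned.isEmpty = false :=
      List.isEmpty_eq_false_iff.mpr (List.ne_nil_of_mem hsl)
    simp [hne, hsl, pv_isIn_singleton]
  · by_cases hdot : '.' ∈ cleaned
    · have hne : cleaned.isEmpty = false :=
        List.isEmpty_eq_false_iff.mpr (List.ne_nil_of_mem hdot)
      simp only [hne, Bool.false_eq_true, if_false, pv_isIn_singleton,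
        decide_eq_true hdot, decide_eq_false hsl, Bool.not_false, if_false,
        Bool.false_or, if_pos hdot, Bool.not_true, Bool.false_or, if_true]
      by_cases hlen : (pvRsplitDot cleaned).1.length ≤ 1
      · have h1 : ¬ (pvRsplitDot cleaned).1.length > 1 := by omega
        have h2 : (0 : Int) + ((pvRsplitDot cleaned).1.length : Int) ≤ 1 := by
          omega
        simp [h1]
      · have h1 : (pvRsplitDot cleaned).1.length > 1 := by omega
        have h2 : ¬ ((0 : Int) + ((pvRsplitDot cleaned).1.length : Int) ≤ 1) := by
          omega
        have hnd : '.' ∉ PySem.Chars.lower (pvRsplitDot cleaned).2 := fun hx =>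
          pv_rsplit_no_dot cleaned hdot ((pv_mem_dot_lower _).mp hx)
        rw [pv_index_eq_scan repo_paths _ hnd]
        simp [h1, h2]
    · by_cases hne : cleaned.isEmpty
      · simp [hne, hdot, hsl]
      · simp [hne, hsl, hdot, pv_isIn_singleton]
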